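-- pv_equiv track=rewrite | github.com/cagurley/scripts | slate_sync/slate_sync.py | validate_keys
-- ===== SOURCE A (Python) =====
-- def validate_keys(srcdict, keys=tuple()):
--     for key in keys:
--         if key not in srcdict:
--             return False
--     for key in srcdict:
--         if key not in keys:
--             return False
--     return True
-- ===== SOURCE B (Python) =====
-- def validate_keys(srcdict, keys=tuple()):
--     return set(srcdict) == set(keys)
-- ===== Notes on version B (the rewrite author's own statement) =====
-- stated objective: simpler
-- what changed: Replaces the two early-return containment loops by a single set-equality comparison of the key sets, which is the mathematical content of the check.
import Mathlib
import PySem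

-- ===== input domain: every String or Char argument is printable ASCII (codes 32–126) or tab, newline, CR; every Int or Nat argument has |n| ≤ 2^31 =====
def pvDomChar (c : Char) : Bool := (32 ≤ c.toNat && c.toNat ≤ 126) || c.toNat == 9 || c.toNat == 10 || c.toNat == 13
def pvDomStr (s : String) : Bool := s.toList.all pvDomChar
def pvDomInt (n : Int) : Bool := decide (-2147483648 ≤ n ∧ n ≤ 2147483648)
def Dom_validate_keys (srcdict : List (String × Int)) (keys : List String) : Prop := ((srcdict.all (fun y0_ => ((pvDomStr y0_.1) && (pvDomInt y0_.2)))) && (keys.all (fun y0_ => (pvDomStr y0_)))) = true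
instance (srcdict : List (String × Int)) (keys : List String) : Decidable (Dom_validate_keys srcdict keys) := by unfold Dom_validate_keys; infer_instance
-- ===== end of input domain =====

-- B replaces A's two containment loops with a single set-equality comparison (simpler).


-- ===== PORT A =====
-- for key in keys: if key not in srcdict: return False  (early-return loop = short-circuit all)
-- for key in srcdict: if key not in keys: return False
-- return True
def validate_keys (srcdict : List (String × Int)) (keys : List String) : Bool :=
  if keys.all (fun key => ((srcdict.map Prod.fst).contains key)) then
    if (srcdict.map Prod.fst).all (fun key => keys.contains key) then
      true
    else false
  else false

-- ===== PORT B =====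
-- return set(srcdict) == set(keys)
def validate_keys_alt (srcdict : List (String × Int)) (keys : List String) : Bool :=
  PySem.Set.equal (PySem.Set.ofList (srcdict.map Prod.fst)) (PySem.Set.ofList keys)

-- ===== PRECONDITION & SPEC =====
def Spec_validate_keys (srcdict : List (String × Int)) (keys : List String) (out : Bool) : Prop := out = validate_keys_alt srcdict keys
instance (srcdict : List (String × Int)) (keys : List String) (out : Bool) : Decidable (Spec_validate_keys srcdict keys out) := by unfold Spec_validate_keys; infer_instance

-- ===== CLAIM (what is proved, stated in full; the proofs are below) =====
def Claim_equal_validate_keys : Prop := ∀ (srcdict : List (String × Int)) (keys : List String), Dom_validate_keys srcdict keys → Spec_validate_keys srcdict keys (validate_keys srcdict keys)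

-- ===== LEMMAS AND PROOFS =====

-- ===== VERDICT (by name: the statement is the Claim_ definition above) =====
theorem validate_keys_spec : Claim_equal_validate_keys := by
  intro srcdict keys _
  unfold Spec_validate_keys validate_keys validate_keys_alt
  rcases h : PySem.Set.equal (PySem.Set.ofList (srcdict.map Prod.fst)) (PySem.Set.ofList keys) with _ | _
  · -- B returns false: not the same key set; show A returns false
    have h' : ¬ ∀ x, (x ∈ PySem.Set.ofList (srcdict.map Prod.fst) ↔ x ∈ PySem.Set.ofList keys) :=
      fun hall => (Bool.eq_false_iff.mp h) ((PySem.Set.equal_iff _ _).mpr hall)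
    rw [not_forall] at h'
    simp only [PySem.Set.mem_ofList] at h'
    obtain ⟨x, hx⟩ := h'
    rw [not_iff] at hx
    by_cases hmem : x ∈ srcdict.map Prod.fst
    · have hk : x ∉ keys := by tauto
      split_ifs with h1 h2 <;> try rfl
      exact absurd (List.all_eq_true.mp h2 x hmem) (fun hc => hk (by simpa using hc))
    · have hk : x ∈ keys := by tauto
      split_ifs with h1 <;> try rfl
      have := List.all_eq_true.mp h1 x hk
      exact absurd (by simpa using this) hmem
  · -- B returns true: same key set; show A returns true
    have h := (PySem.Set.equal_iff _ _).mp h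
    simp only [PySem.Set.mem_ofList] at h
    have h1 : keys.all (fun key => (srcdict.map Prod.fst).contains key) = true := by
      rw [List.all_eq_true]
      intro x hx
      simpa using (h x).mpr hx
    have h2 : (srcdict.map Prod.fst).all (fun key => keys.contains key) = true := by
      rw [List.all_eq_true]
      intro x hx
      simpa using (h x).mp hx
    rw [if_pos h1, if_pos h2]
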